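-- pv_equiv track=rewrite | github.com/jiangjiechen/LOREN | src/parsing_client/sentence_parser.py | refine_results
-- ===== SOURCE A (Python) =====
-- def refine_results(tokens, spans, stopwords):
--     all_spans = []
--     for span_start, span_end, is_candidate in spans:
--         # remove stopwords
--         if not is_candidate:
--             while span_start < span_end and tokens[span_start].lower() in stopwords:
--                 span_start += 1
--             if span_start >= span_end:
--                 continue
--
--         # add prefix
--         if span_start > 0 and tokens[span_start - 1] in ['a', 'an', 'A', 'An', 'the', 'The']:
--             span_start -= 1
--
--         # convert token-level index into char-level index
--         span = ' '.join(tokens[span_start:span_end])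
--         span_start = len(' '.join(tokens[:span_start])) + 1 * min(1, span_start)  # 1 for blank
--         span_end = span_start + len(span)
--
--         all_spans.append((span, span_start, span_end))
--     all_spans = sorted(all_spans, key=lambda x: (x[1], x[1] - x[2]))
--
--     # remove overlap
--     refined_spans = []
--     for span, span_start, span_end in all_spans:
--         flag = True
--         for _, start, end in refined_spans:
--             if start <= span_start < span_end <= end:
--                 flag = False
--                 break
--         if flag:
--             refined_spans.append((span, span_start, span_end))
--
--     return refined_spans
-- ===== SOURCE B (Python) =====
-- def refine_results(tokens, spans, stopwords):
--     n = len(tokens)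
--     # per-token tables, built once
--     is_stop = [t.lower() in stopwords for t in tokens]
--     is_article = [t in ('a', 'an', 'A', 'An', 'the', 'The') for t in tokens]
--     # nxt[i] = smallest j >= i with a non-stopword token, else n (backward pass)
--     nxt = [0] * (n + 1)
--     nxt[n] = n
--     for i in range(n - 1, -1, -1):
--         nxt[i] = nxt[i + 1] if is_stop[i] else i
--     # offs[i] = char offset of token i in ' '.join(tokens) (prefix sums)
--     offs = [0] * (n + 1)
--     for i, t in enumerate(tokens):
--         offs[i + 1] = offs[i] + len(t) + 1
--
--     cand = []
--     for s, e, is_c in spans: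
--         if not is_c:
--             if s < e:
--                 s = min(nxt[s], e)
--             if s >= e:
--                 continue
--         if s > 0 and is_article[s - 1]:
--             s -= 1
--         text = ' '.join(tokens[s:e])
--         cs = offs[s]
--         cand.append((text, cs, cs + len(text)))
--     cand.sort(key=lambda x: (x[1], x[1] - x[2]))
--
--     # spans are sorted by start: a kept span contains a later one iff its end
--     # reaches the running maximum end, so one pass suffices
--     out, max_end = [], None
--     for item in cand:
--         _, cs, ce = item
--         if max_end is not None and cs < ce <= max_end:
--             continue
--         out.append(item)
--         if max_end is None or ce > max_end:
--             max_end = ce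
--     return out
-- ===== Notes on version B (the rewrite author's own statement) =====
-- stated objective: alternative
-- what changed: B precomputes per-token tables once (a lowercase-stopword flag, an article flag, a next-non-stopword jump array built by a backward pass, and a prefix-sum char-offset array), replacing A's per-span stopword while-loop by one min with the jump array and A's per-span prefix re-join by one offset lookup; overlap removal becomes a single pass over the sorted spans with a running maximum end instead of scanning all previously kept spans (asymptotically lighter, but the table-building is interpreted Python while A's joins run in C, so it is not measurably faster).
-- outside the precondition, e.g. on refine_results(['x'], [(-1, 1, True)], set()): A returns [('x', -1, 0)], B returns [('x', 2, 3)]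
import Mathlib
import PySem

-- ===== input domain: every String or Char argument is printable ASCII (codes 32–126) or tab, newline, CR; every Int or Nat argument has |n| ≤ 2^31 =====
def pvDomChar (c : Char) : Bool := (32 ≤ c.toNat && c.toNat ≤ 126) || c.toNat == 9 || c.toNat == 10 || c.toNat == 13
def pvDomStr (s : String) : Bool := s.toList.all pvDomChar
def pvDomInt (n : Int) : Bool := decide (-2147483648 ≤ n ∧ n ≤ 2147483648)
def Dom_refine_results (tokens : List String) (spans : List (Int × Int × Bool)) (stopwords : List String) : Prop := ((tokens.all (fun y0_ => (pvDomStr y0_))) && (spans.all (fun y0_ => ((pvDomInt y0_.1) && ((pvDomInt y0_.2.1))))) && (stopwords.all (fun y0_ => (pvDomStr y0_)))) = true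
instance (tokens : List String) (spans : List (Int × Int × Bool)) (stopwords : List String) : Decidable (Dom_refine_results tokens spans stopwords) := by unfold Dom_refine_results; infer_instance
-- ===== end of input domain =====

-- B replaces A's per-span work by tables built once: a next-non-stopword jump array (backward
-- pass) instead of the stopword while-loop, a prefix-sum char-offset array instead of re-joining
-- the token prefix per span, and one sorted pass with a running max end instead of scanning all
-- kept spans. Neither program mutates its arguments.

-- ===== PORT A =====
-- the stopword-stripping while loop; it runs at most (e - s) times, so (e - s).toNat is exact fuel
def rrStripGo (tokens stopwords : List String) (e : Int) : Nat → Int → Int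
  | 0, s => s
  | fuel + 1, s =>
    if s < e ∧ stopwords.contains (PySem.Str.lower (PySem.List.pyGetD tokens s "")) then
      rrStripGo tokens stopwords e fuel (s + 1)
    else s

def rrStrip (tokens stopwords : List String) (e : Int) (s : Int) : Int :=
  rrStripGo tokens stopwords e (e - s).toNat s

def rrConvertA (tokens stopwords : List String) (acc : List (String × Int × Int))
    (sp : Int × Int × Bool) : List (String × Int × Int) :=
  let s1 := if sp.2.2 then sp.1 else rrStrip tokens stopwords sp.2.1 sp.1
  if sp.2.2 = false ∧ sp.2.1 ≤ s1 then acc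
  else
    let s2 := if 0 < s1 ∧ ["a", "an", "A", "An", "the", "The"].contains (PySem.List.pyGetD tokens (s1 - 1) "") then s1 - 1 else s1
    let span := PySem.Str.join " " (PySem.List.slice tokens (some s2) (some sp.2.1))
    let cs := PySem.Str.len (PySem.Str.join " " (PySem.List.slice tokens none (some s2))) + 1 * min 1 s2
    acc ++ [(span, cs, cs + PySem.Str.len span)]

def rrDropA (refined : List (String × Int × Int)) (sp : String × Int × Int) : List (String × Int × Int) :=
  if refined.any (fun r => decide (r.2.1 ≤ sp.2.1 ∧ sp.2.1 < sp.2.2 ∧ sp.2.2 ≤ r.2.2)) then refined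
  else refined ++ [sp]

def refine_results (tokens : List String) (spans : List (Int × Int × Bool)) (stopwords : List String) : List (String × Int × Int) :=
  let all_spans := spans.foldl (rrConvertA tokens stopwords) []
  (PySem.List.sorted2 all_spans (fun x => x.2.1) (fun x => x.2.1 - x.2.2)).foldl rrDropA []

-- ===== PORT B =====
-- nxt[i] = smallest j >= i whose flag is false, else n; Source B fills it by a backward loop, so
-- the value at i is defined from the value at i + 1: the natural right-recursion
def rbNxtFrom : Nat → List Bool → List Int
  | i, [] => [(i : Int)]
  | i, b :: rest =>
    let tail := rbNxtFrom (i + 1) rest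
    (if b then tail.headD (i : Int) else (i : Int)) :: tail

-- offs[i] = char offset of token i in ' '.join(tokens): prefix sums, carried left to right
def rbOffsFrom : Int → List String → List Int
  | c, [] => [c]
  | c, t :: rest => c :: rbOffsFrom (c + PySem.Str.len t + 1) rest

def rbConvert (tokens : List String) (isArt : List Bool) (nxt offs : List Int) :
    List (Int × Int × Bool) → List (String × Int × Int)
  | [] => []
  | (s, e, isC) :: rest =>
    let s1 := if isC then s else if s < e then min (PySem.List.pyGetD nxt s 0) e else s
    if isC = false ∧ e ≤ s1 then rbConvert tokens isArt nxt offs rest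
    else
      let s2 := if 0 < s1 ∧ PySem.List.pyGetD isArt (s1 - 1) false = true then s1 - 1 else s1
      let text := PySem.Str.join " " (PySem.List.slice tokens (some s2) (some e))
      let cs := PySem.List.pyGetD offs s2 0
      (text, cs, cs + PySem.Str.len text) :: rbConvert tokens isArt nxt offs rest

def rbDedup : Option Int → List (String × Int × Int) → List (String × Int × Int)
  | _, [] => []
  | none, sp :: rest => sp :: rbDedup (some sp.2.2) rest
  | some mv, sp :: rest =>
    if sp.2.1 < sp.2.2 ∧ sp.2.2 ≤ mv then rbDedup (some mv) rest
    else sp :: rbDedup (some (if mv < sp.2.2 then sp.2.2 else mv)) rest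

def refine_results_alt (tokens : List String) (spans : List (Int × Int × Bool)) (stopwords : List String) : List (String × Int × Int) :=
  let isStop := tokens.map (fun t => stopwords.contains (PySem.Str.lower t))
  let isArt := tokens.map (fun t => ["a", "an", "A", "An", "the", "The"].contains t)
  let nxt := rbNxtFrom 0 isStop
  let offs := rbOffsFrom 0 tokens
  rbDedup none (PySem.List.sorted2 (rbConvert tokens isArt nxt offs spans) (fun x => x.2.1) (fun x => x.2.1 - x.2.2))

-- ===== PRECONDITION & SPEC =====
-- Pre_ restricts spans to the natural domain of token indices: a span start must be a valid
-- 0-based position (0 ≤ start ≤ len(tokens)); negative starts are excluded because A's char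
-- offsets then come from Python's negative-index wraparound, and starts past the end make A raise
-- IndexError.  A non-candidate span may also have any end if it is dropped (end ≤ start) or if the
-- stopword loop provably stops inside the token list (some non-stopword token at or after start);
-- otherwise the loop runs past the list and A raises IndexError.
def Pre_refine_results (tokens : List String) (spans : List (Int × Int × Bool)) (stopwords : List String) : Prop :=
  ∀ sp ∈ spans,
    if sp.2.2 then 0 ≤ sp.1 ∧ sp.1 ≤ (tokens.length : Int)
    else sp.2.1 ≤ sp.1 ∨ (0 ≤ sp.1 ∧ (sp.2.1 ≤ (tokens.length : Int) ∨
      ∃ i < tokens.length, sp.1 ≤ (i : Int) ∧ stopwords.contains (PySem.Str.lower (tokens.getD i "")) = false))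
instance (tokens : List String) (spans : List (Int × Int × Bool)) (stopwords : List String) : Decidable (Pre_refine_results tokens spans stopwords) := by unfold Pre_refine_results; infer_instance

def pvWitness_refine_results : List String × (List (Int × Int × Bool)) × List String :=
  (["the", "big", "cat"], [(1, 3, true), (0, 3, false)], ["the"])

def Spec_refine_results (tokens : List String) (spans : List (Int × Int × Bool)) (stopwords : List String) (out : List (String × Int × Int)) : Prop := out = refine_results_alt tokens spans stopwords
instance (tokens : List String) (spans : List (Int × Int × Bool)) (stopwords : List String) (out : List (String × Int × Int)) : Decidable (Spec_refine_results tokens spans stopwords out) := by unfold Spec_refine_results; infer_instance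

-- ===== CLAIM (what is proved, stated in full; the proofs are below) =====
def Claim_equal_refine_results : Prop := ∀ (tokens : List String) (spans : List (Int × Int × Bool)) (stopwords : List String), Dom_refine_results tokens spans stopwords → Pre_refine_results tokens spans stopwords → Spec_refine_results tokens spans stopwords (refine_results tokens spans stopwords)

-- ===== LEMMAS AND PROOFS =====

-- number of leading `true` flags
def rrFF (bs : List Bool) : Nat := (bs.takeWhile id).length

-- the value the backward pass stores at slot k
theorem rbNxtFrom_head (bs : List Bool) : ∀ (i : Nat) (d : Int),
    (rbNxtFrom i bs).headD d = ((i + rrFF bs : Nat) : Int) := by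
  induction bs with
  | nil => intro i d; simp [rbNxtFrom, rrFF]
  | cons b rest ih =>
    intro i d
    rw [rbNxtFrom]
    cases b with
    | false => simp [rrFF]
    | true =>
      simp only [List.headD_cons]
      rw [ih (i + 1)]
      simp only [rrFF, List.takeWhile]
      norm_num
      omega

theorem rbNxtFrom_get (bs : List Bool) : ∀ (i k : Nat), k ≤ bs.length →
    (rbNxtFrom i bs).getD k 0 = ((i + k + rrFF (bs.drop k) : Nat) : Int) := by
  induction bs with
  | nil =>
    intro i k hk
    have hk0 : k = 0 := by simpa using hk
    subst hk0
    simp [rbNxtFrom, rrFF]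
  | cons b rest ih =>
    intro i k hk
    cases k with
    | zero =>
      rw [rbNxtFrom]
      cases b with
      | false => simp [rrFF]
      | true =>
        simp only [List.getD_cons_zero, List.drop_zero]
        rw [rbNxtFrom_head]
        simp only [rrFF, List.takeWhile]
        norm_num
        omega
    | succ k' =>
      rw [rbNxtFrom]
      simp only [List.getD_cons_succ, List.drop_succ_cons]
      rw [ih (i + 1) k' (by simpa using hk)]
      congr 1
      omega

theorem rbOffsFrom_get (tokens : List String) :
    ∀ (c : Int) (k : Nat), k ≤ tokens.length →
    (rbOffsFrom c tokens).getD k 0 = c + ((tokens.take k).map (fun t => PySem.Str.len t + 1)).sum := by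
  induction tokens with
  | nil =>
    intro c k hk
    have hk0 : k = 0 := by simpa using hk
    subst hk0
    simp [rbOffsFrom]
  | cons t rest ih =>
    intro c k hk
    cases k with
    | zero => simp [rbOffsFrom]
    | succ k' =>
      rw [rbOffsFrom]
      simp only [List.getD_cons_succ, List.take_succ_cons, List.map_cons, List.sum_cons]
      rw [ih (c + PySem.Str.len t + 1) k' (by simpa using hk)]
      ring

-- cumulative char cost of the first k tokens
def rrJ (tokens : List String) (k : Nat) : Int :=
  ((tokens.take k).map (fun t => PySem.Str.len t + 1)).sum

theorem charsJoinLen (p : List Char) (ps : List (List Char)) :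
    (PySem.Chars.join [' '] (p :: ps)).length + 1 = ((p :: ps).map (fun q => q.length + 1)).sum := by
  induction ps generalizing p with
  | nil => simp [PySem.Chars.join_singleton]
  | cons q rest ih =>
    rw [PySem.Chars.join_cons_cons]
    have h := ih q
    simp only [List.map_cons, List.sum_cons] at h ⊢
    simp only [List.length_append, List.length_cons, List.length_nil]
    omega

theorem strSumCast (ps : List String) :
    (ps.map (fun u => PySem.Str.len u + 1)).sum = (((ps.map (fun q => q.toList.length + 1)).sum : Nat) : Int) := by
  induction ps with
  | nil => simp
  | cons p ps ih =>
    rw [List.map_cons, List.sum_cons, ih, List.map_cons, List.sum_cons, PySem.Str.len_eq]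
    push_cast
    ring

theorem csA_eq (tokens : List String) (s2 : Int) (h0 : 0 ≤ s2) (hn : s2 ≤ (tokens.length : Int)) :
    PySem.Str.len (PySem.Str.join " " (PySem.List.slice tokens none (some s2))) + 1 * min 1 s2
      = rrJ tokens s2.toNat := by
  rw [PySem.List.slice_to tokens h0]
  rcases Nat.eq_zero_or_pos s2.toNat with hz | hp
  · have : s2 = 0 := by omega
    subst this
    simp [rrJ, PySem.Str.len_eq, PySem.Str.toList_join, PySem.Chars.join_nil]
  · have hmin : min 1 s2 = 1 := by omega
    have hlt : 0 < tokens.length := by omega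
    obtain ⟨t, rest, hcons⟩ : ∃ t rest, tokens.take s2.toNat = t :: rest := by
      cases htk : tokens.take s2.toNat with
      | nil =>
        exfalso
        have : (tokens.take s2.toNat).length = min s2.toNat tokens.length := List.length_take ..
        rw [htk] at this
        simp at this
        omega
      | cons t rest => exact ⟨t, rest, rfl⟩
    rw [hcons, hmin, rrJ, hcons, strSumCast]
    have hq := charsJoinLen t.toList (rest.map String.toList)
    rw [PySem.Str.len_eq, PySem.Str.toList_join, show (" ".toList : List Char) = [' '] from rfl]
    have hmap : (t :: rest).map (fun q => q.toList.length + 1)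
        = (((t :: rest).map String.toList).map (fun q => q.length + 1)) := by
      simp [List.map_map, Function.comp]
    rw [hmap, List.map_cons]
    omega

-- B's offset lookup computes the same char index as A's prefix join
theorem csB_eq (tokens : List String) (s2 : Int) (h0 : 0 ≤ s2) (hn : s2 ≤ (tokens.length : Int)) :
    PySem.List.pyGetD (rbOffsFrom 0 tokens) s2 0 = rrJ tokens s2.toNat := by
  rw [PySem.List.pyGetD_of_nonneg _ _ h0, rbOffsFrom_get tokens 0 s2.toNat (by omega)]
  simp [rrJ]

-- A's stopword loop computes min(nxt[s], e): the loop stops at the first non-stopword token,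
-- which is exactly what the jump array stores
theorem stripGo_spec (tokens stopwords : List String) (e : Int) :
    ∀ (fuel : Nat) (s : Int), fuel = (e - s).toNat → 0 ≤ s → s ≤ e → s ≤ (tokens.length : Int) →
    (e ≤ (tokens.length : Int) ∨ ∃ i < tokens.length, s ≤ (i : Int) ∧
        stopwords.contains (PySem.Str.lower (tokens.getD i "")) = false) →
    rrStripGo tokens stopwords e fuel s
      = min (((s.toNat + rrFF (((tokens.map (fun t => stopwords.contains (PySem.Str.lower t))).drop s.toNat)) : Nat) : Int)) e := by
  intro fuel
  induction fuel with
  | zero =>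
    intro s hf h0 hse hsn _
    have hes : s = e := by omega
    rw [rrStripGo]
    omega
  | succ n ih =>
    intro s hf h0 hse hsn hH
    have hlt : s < e := by omega
    have hsn' : s < (tokens.length : Int) := by
      rcases hH with h | ⟨i, hi, hsi, _⟩
      · omega
      · omega
    set bs := tokens.map (fun t => stopwords.contains (PySem.Str.lower t)) with hbs
    have hsl : s.toNat < tokens.length := by omega
    have hP : stopwords.contains (PySem.Str.lower (PySem.List.pyGetD tokens s ""))
        = bs.getD s.toNat false := by
      rw [PySem.List.pyGetD_of_nonneg _ _ h0, hbs]
      rw [List.getD_eq_getElem?_getD, List.getD_eq_getElem?_getD, List.getElem?_map]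
      rw [List.getElem?_eq_getElem hsl]
      simp
    have hdrop : bs.drop s.toNat = bs.getD s.toNat false :: bs.drop (s.toNat + 1) := by
      have hbl : s.toNat < bs.length := by simp [hbs]; omega
      rw [List.drop_eq_getElem_cons hbl, List.getD_eq_getElem?_getD, List.getElem?_eq_getElem hbl]
      simp
    rw [rrStripGo]
    by_cases hstop : bs.getD s.toNat false = true
    · rw [if_pos ⟨hlt, by rw [hP]; exact hstop⟩]
      have hff : rrFF (bs.drop s.toNat) = 1 + rrFF (bs.drop (s.toNat + 1)) := by
        rw [hdrop, hstop, rrFF, List.takeWhile]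
        simp [rrFF]
        omega
      have hH' : e ≤ (tokens.length : Int) ∨ ∃ i < tokens.length, s + 1 ≤ (i : Int) ∧
          stopwords.contains (PySem.Str.lower (tokens.getD i "")) = false := by
        rcases hH with h | ⟨i, hi, hsi, hw⟩
        · exact Or.inl h
        · refine Or.inr ⟨i, hi, ?_, hw⟩
          rcases eq_or_lt_of_le hsi with heq | hlt'
          · exfalso
            have hieq : i = s.toNat := by omega
            have : bs.getD s.toNat false = stopwords.contains (PySem.Str.lower (tokens.getD i "")) := by
              rw [hbs, hieq]
              rw [List.getD_eq_getElem?_getD, List.getD_eq_getElem?_getD, List.getElem?_map]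
              rw [List.getElem?_eq_getElem hsl]
              simp
            rw [this, hw] at hstop
            exact Bool.false_ne_true hstop
          · omega
      have e1 : n = (e - (s + 1)).toNat := by clear hH hH' ih; omega
      have e2 : (0:Int) ≤ s + 1 := by clear hH hH' ih; omega
      have e3 : s + 1 ≤ e := by clear hH hH' ih; omega
      have e4 : s + 1 ≤ (tokens.length : Int) := by clear hH hH' ih; omega
      rw [ih (s + 1) e1 e2 e3 e4 hH']
      have : (s + 1).toNat = s.toNat + 1 := by clear hH hH' ih; omega
      rw [this, hff]
      congr 2
      clear hH hH' ih
      omega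
    · rw [if_neg (by rw [hP]; intro hc; exact hstop hc.2)]
      have hff : rrFF (bs.drop s.toNat) = 0 := by
        rw [hdrop, rrFF, List.takeWhile]
        simp at hstop
        simp [hstop]
      rw [hff]
      clear hH ih
      omega

-- jump-array bound: nxt values never exceed the token count
theorem rrFF_le (bs : List Bool) : rrFF bs ≤ bs.length :=
  (List.takeWhile_prefix id).length_le

-- the per-span condition Pre_ imposes
def rrPreSpan (tokens stopwords : List String) (sp : Int × Int × Bool) : Prop :=
  if sp.2.2 then 0 ≤ sp.1 ∧ sp.1 ≤ (tokens.length : Int)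
  else sp.2.1 ≤ sp.1 ∨ (0 ≤ sp.1 ∧ (sp.2.1 ≤ (tokens.length : Int) ∨
    ∃ i < tokens.length, sp.1 ≤ (i : Int) ∧ stopwords.contains (PySem.Str.lower (tokens.getD i "")) = false))

-- A's stripped start equals B's jump-array expression, with bounds when the span is kept
theorem span_s1 (tokens stopwords : List String) (sp : Int × Int × Bool)
    (hpre : rrPreSpan tokens stopwords sp) :
    (if sp.2.2 then sp.1 else rrStrip tokens stopwords sp.2.1 sp.1)
      = (if sp.2.2 then sp.1 else if sp.1 < sp.2.1 then
          min (PySem.List.pyGetD (rbNxtFrom 0 (tokens.map (fun t => stopwords.contains (PySem.Str.lower t)))) sp.1 0) sp.2.1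
        else sp.1)
    ∧ (¬ (sp.2.2 = false ∧ sp.2.1 ≤ (if sp.2.2 then sp.1 else rrStrip tokens stopwords sp.2.1 sp.1)) →
        0 ≤ (if sp.2.2 then sp.1 else rrStrip tokens stopwords sp.2.1 sp.1)
        ∧ (if sp.2.2 then sp.1 else rrStrip tokens stopwords sp.2.1 sp.1) ≤ (tokens.length : Int)) := by
  rw [rrPreSpan] at hpre
  by_cases hc : sp.2.2
  · rw [if_pos hc] at hpre
    refine ⟨by rw [if_pos hc, if_pos hc], fun _ => ?_⟩
    rw [if_pos hc]
    exact hpre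
  · have hcb : sp.2.2 = false := by simpa using hc
    rw [if_neg hc] at hpre
    simp only [if_neg hc]
    by_cases hse : sp.1 < sp.2.1
    · have h0 : 0 ≤ sp.1 ∧ (sp.2.1 ≤ (tokens.length : Int) ∨
          ∃ i < tokens.length, sp.1 ≤ (i : Int) ∧
            stopwords.contains (PySem.Str.lower (tokens.getD i "")) = false) := by
        rcases hpre with h | h
        · omega
        · exact h
      have hsn : sp.1 ≤ (tokens.length : Int) := by
        rcases h0.2 with h | ⟨i, hi, hsi, _⟩ <;> omega
      have hstrip := stripGo_spec tokens stopwords sp.2.1 (sp.2.1 - sp.1).toNat sp.1 rfl h0.1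
        (by omega) hsn h0.2
      have hnxt : PySem.List.pyGetD (rbNxtFrom 0 (tokens.map (fun t => stopwords.contains (PySem.Str.lower t)))) sp.1 0
          = ((sp.1.toNat + rrFF ((tokens.map (fun t => stopwords.contains (PySem.Str.lower t))).drop sp.1.toNat) : Nat) : Int) := by
        rw [PySem.List.pyGetD_of_nonneg _ _ h0.1]
        rw [rbNxtFrom_get _ 0 sp.1.toNat (by simp; omega)]
        norm_num
      rw [if_pos hse, rrStrip, hstrip, hnxt]
      refine ⟨rfl, fun _ => ?_⟩
      have hffb := rrFF_le ((tokens.map (fun t => stopwords.contains (PySem.Str.lower t))).drop sp.1.toNat)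
      rw [List.length_drop, List.length_map] at hffb
      constructor
      · omega
      · omega
    · rw [if_neg hse, rrStrip]
      have : (sp.2.1 - sp.1).toNat = 0 := by omega
      rw [this, rrStripGo]
      exact ⟨rfl, fun hk => by exfalso; exact hk ⟨hcb, by omega⟩⟩

-- the article test through B's precomputed flag table
theorem artic_eq (tokens : List String) (s1 : Int) (h0 : 0 < s1) (hn : s1 ≤ (tokens.length : Int)) :
    PySem.List.pyGetD (tokens.map (fun t => ["a", "an", "A", "An", "the", "The"].contains t)) (s1 - 1) false
      = ["a", "an", "A", "An", "the", "The"].contains (PySem.List.pyGetD tokens (s1 - 1) "") := by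
  have hl : (s1 - 1).toNat < tokens.length := by omega
  rw [PySem.List.pyGetD_of_nonneg _ _ (by omega : (0:Int) ≤ s1 - 1),
      PySem.List.pyGetD_of_nonneg _ _ (by omega : (0:Int) ≤ s1 - 1)]
  rw [List.getD_eq_getElem?_getD, List.getD_eq_getElem?_getD, List.getElem?_map]
  rw [List.getElem?_eq_getElem hl]
  simp

-- the whole conversion pass: A's foldl with append = B's structural recursion
theorem convert_eq (tokens stopwords : List String) :
    ∀ (spans : List (Int × Int × Bool)) (acc : List (String × Int × Int)),
    (∀ sp ∈ spans, rrPreSpan tokens stopwords sp) →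
    spans.foldl (rrConvertA tokens stopwords) acc
      = acc ++ rbConvert tokens (tokens.map (fun t => ["a", "an", "A", "An", "the", "The"].contains t))
          (rbNxtFrom 0 (tokens.map (fun t => stopwords.contains (PySem.Str.lower t))))
          (rbOffsFrom 0 tokens) spans := by
  intro spans
  induction spans with
  | nil => intro acc _; simp [rbConvert]
  | cons sp rest ih =>
    intro acc hpre
    obtain ⟨s, e, isC⟩ := sp
    have hsp := span_s1 tokens stopwords (s, e, isC) (hpre _ List.mem_cons_self)
    simp only [List.foldl_cons]
    rw [rbConvert]
    set s1A := if isC then s else rrStrip tokens stopwords e s with hs1A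
    have hs1 : s1A = (if isC then s else if s < e then
        min (PySem.List.pyGetD (rbNxtFrom 0 (tokens.map (fun t => stopwords.contains (PySem.Str.lower t)))) s 0) e
      else s) := hsp.1
    rw [rrConvertA]
    simp only [← hs1]
    by_cases hskip : isC = false ∧ e ≤ s1A
    · rw [if_pos hskip, if_pos hskip]
      exact ih acc (fun x hx => hpre x (List.mem_cons_of_mem _ hx))
    · rw [if_neg hskip, if_neg hskip]
      have hb := hsp.2 hskip
      have hart : (0 < s1A ∧ ["a", "an", "A", "An", "the", "The"].contains (PySem.List.pyGetD tokens (s1A - 1) ""))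
          ↔ (0 < s1A ∧ PySem.List.pyGetD (tokens.map (fun t => ["a", "an", "A", "An", "the", "The"].contains t)) (s1A - 1) false = true) := by
        constructor
        · rintro ⟨hp, hq⟩
          exact ⟨hp, by rw [artic_eq tokens s1A hp hb.2]; exact hq⟩
        · rintro ⟨hp, hq⟩
          rw [artic_eq tokens s1A hp hb.2] at hq
          exact ⟨hp, hq⟩
      set s2 := if 0 < s1A ∧ ["a", "an", "A", "An", "the", "The"].contains (PySem.List.pyGetD tokens (s1A - 1) "") then s1A - 1 else s1A with hs2
      have hs2' : (if 0 < s1A ∧ PySem.List.pyGetD (tokens.map (fun t => ["a", "an", "A", "An", "the", "The"].contains t)) (s1A - 1) false = true then s1A - 1 else s1A) = s2 := by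
        rw [hs2]
        by_cases h : 0 < s1A ∧ ["a", "an", "A", "An", "the", "The"].contains (PySem.List.pyGetD tokens (s1A - 1) "")
        · rw [if_pos h, if_pos (hart.mp h)]
        · rw [if_neg h, if_neg (fun hx => h (hart.mpr hx))]
      have hb2 : 0 ≤ s2 ∧ s2 ≤ (tokens.length : Int) := by
        rw [hs2]; split <;> omega
      rw [hs2']
      have hcs : PySem.List.pyGetD (rbOffsFrom 0 tokens) s2 0
          = PySem.Str.len (PySem.Str.join " " (PySem.List.slice tokens none (some s2))) + 1 * min 1 s2 := by
        rw [csB_eq tokens s2 hb2.1 hb2.2, csA_eq tokens s2 hb2.1 hb2.2]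
      rw [hcs]
      rw [ih (acc ++ [_]) (fun x hx => hpre x (List.mem_cons_of_mem _ hx))]
      simp

-- one-pass overlap removal with a running max end = A's scan over all kept spans,
-- on a list sorted by char start
theorem dedup_eq :
    ∀ (L : List (String × Int × Int)) (acc : List (String × Int × Int)) (m : Option Int),
      (∀ x ∈ L, ∀ r ∈ acc, r.2.1 ≤ x.2.1) →
      L.Pairwise (fun a b => a.2.1 ≤ b.2.1) →
      (match m with
       | none => acc = []
       | some mv => (∃ r ∈ acc, r.2.2 = mv) ∧ ∀ r ∈ acc, r.2.2 ≤ mv) →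
      L.foldl rrDropA acc = acc ++ rbDedup m L := by
  intro L
  induction L with
  | nil => intro acc m _ _ _; simp [rbDedup]
  | cons sp L' ih =>
    intro acc m hstart hpair hinv
    simp only [List.foldl_cons]
    have hstart' : ∀ x ∈ L', ∀ r ∈ acc, r.2.1 ≤ x.2.1 := fun x hx r hr => hstart x (List.mem_cons_of_mem _ hx) r hr
    have hpair' : L'.Pairwise (fun a b => a.2.1 ≤ b.2.1) := hpair.of_cons
    have hsp : ∀ x ∈ L', sp.2.1 ≤ x.2.1 := (List.pairwise_cons.mp hpair).1
    cases m with
    | none =>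
      have hacc : acc = [] := hinv
      subst hacc
      have hA : rrDropA [] sp = [sp] := by simp [rrDropA]
      rw [hA, rbDedup]
      rw [ih [sp] (some sp.2.2)
        (fun x hx r hr => by rcases List.mem_singleton.mp hr with rfl; exact hsp x hx)
        hpair'
        ⟨⟨sp, List.mem_singleton.mpr rfl, rfl⟩, fun r hr => by rcases List.mem_singleton.mp hr with rfl; exact le_refl _⟩]
      simp
    | some mv =>
      obtain ⟨⟨rm, hrm, hrmv⟩, hmax⟩ := hinv
      rw [rbDedup]
      by_cases hdrop : sp.2.1 < sp.2.2 ∧ sp.2.2 ≤ mv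
      · rw [if_pos hdrop]
        have hA : rrDropA acc sp = acc := by
          rw [rrDropA, if_pos]
          refine List.any_eq_true.mpr ⟨rm, hrm, ?_⟩
          refine decide_eq_true ⟨hstart sp (List.mem_cons_self) rm hrm, hdrop.1, by omega⟩
        rw [hA]
        exact ih acc (some mv) hstart' hpair' ⟨⟨rm, hrm, hrmv⟩, hmax⟩
      · rw [if_neg hdrop]
        have hA : rrDropA acc sp = acc ++ [sp] := by
          rw [rrDropA, if_neg]
          intro hany
          obtain ⟨r, hr, hcond⟩ := List.any_eq_true.mp hany
          have hc := of_decide_eq_true hcond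
          exact hdrop ⟨hc.2.1, le_trans hc.2.2 (hmax r hr)⟩
        rw [hA]
        rw [ih (acc ++ [sp]) (some (if mv < sp.2.2 then sp.2.2 else mv))
          (fun x hx r hr => by
            rcases List.mem_append.mp hr with hr' | hr'
            · exact hstart' x hx r hr'
            · rcases List.mem_singleton.mp hr' with rfl
              exact hsp x hx)
          hpair'
          ⟨by
            by_cases hlt : mv < sp.2.2
            · exact ⟨sp, List.mem_append_right _ (List.mem_singleton.mpr rfl), by rw [if_pos hlt]⟩
            · exact ⟨rm, List.mem_append_left _ hrm, by rw [if_neg hlt]; exact hrmv⟩,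
           fun r hr => by
            rcases List.mem_append.mp hr with hr' | hr'
            · have := hmax r hr'
              split <;> omega
            · rcases List.mem_singleton.mp hr' with rfl
              split <;> omega⟩]
        simp

-- the insertion of PySem's stable sort preserves pairwise order on any key the
-- "before" predicate is monotone for
theorem insertBy_pairwise_key {α : Type} (before : α → α → Bool) (key : α → Int)
    (hb : ∀ a b, before a b = true → key a ≤ key b)
    (hb' : ∀ a b, before a b = false → key b ≤ key a) :
    ∀ (x : α) (ys : List α), ys.Pairwise (fun a b => key a ≤ key b) →
      (PySem.List.insertBy before x ys).Pairwise (fun a b => key a ≤ key b) := by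
  intro x ys
  induction ys with
  | nil => intro _; simp [PySem.List.insertBy.eq_1]
  | cons y ys ih =>
    intro hp
    rw [PySem.List.insertBy.eq_2]
    obtain ⟨hy, hys⟩ := List.pairwise_cons.mp hp
    split
    · rename_i ht
      refine List.pairwise_cons.mpr ⟨?_, hp⟩
      intro z hz
      rcases List.mem_cons.mp hz with rfl | hz'
      · exact hb x z ht
      · exact le_trans (hb x y ht) (hy z hz')
    · rename_i hf
      refine List.pairwise_cons.mpr ⟨?_, ih hys⟩
      intro z hz
      have hfb : before x y = false := by simpa using hf
      rcases (PySem.List.insertBy_mem_iff _ _ _ _).mp hz with hzx | hz'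
      · rw [hzx]
        exact hb' x y hfb
      · exact hy z hz'

theorem sorted2_pairwise_fst (xs : List (String × Int × Int)) :
    (PySem.List.sorted2 xs (fun x => x.2.1) (fun x => x.2.1 - x.2.2)).Pairwise
      (fun a b => a.2.1 ≤ b.2.1) := by
  rw [PySem.List.sorted2]
  simp only [if_neg (by simp : ¬ (false = true))]
  set before := fun (a b : String × Int × Int) =>
    (decide (a.2.1 < b.2.1) || (!decide (b.2.1 < a.2.1) && decide (a.2.1 - a.2.2 < b.2.1 - b.2.2))) with hbef
  have hb : ∀ a b, before a b = true → a.2.1 ≤ b.2.1 := by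
    intro a b h
    rw [hbef] at h
    simp only [Bool.or_eq_true, Bool.and_eq_true, decide_eq_true_eq, Bool.not_eq_true',
      decide_eq_false_iff_not] at h
    rcases h with h | ⟨h, _⟩ <;> omega
  have hb' : ∀ a b, before a b = false → b.2.1 ≤ a.2.1 := by
    intro a b h
    rw [hbef] at h
    simp only [Bool.or_eq_false_iff, decide_eq_false_iff_not] at h
    omega
  suffices hgen : ∀ (l : List (String × Int × Int)) (acc : List (String × Int × Int)),
      acc.Pairwise (fun a b => a.2.1 ≤ b.2.1) →
      (l.foldl (fun acc x => PySem.List.insertBy before x acc) acc).Pairwise (fun a b => a.2.1 ≤ b.2.1) by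
    exact hgen xs [] (List.Pairwise.nil)
  intro l
  induction l with
  | nil => intro acc h; exact h
  | cons z l ih =>
    intro acc h
    exact ih _ (insertBy_pairwise_key before (fun x => x.2.1) hb hb' z acc h)

-- ===== VERDICT (by name: the statement is the Claim_ definition above) =====
theorem refine_results_spec : Claim_equal_refine_results := by
  intro tokens spans stopwords _hdom hpre
  unfold Spec_refine_results
  rw [refine_results, refine_results_alt]
  have hall := convert_eq tokens stopwords spans [] (fun sp hsp => hpre sp hsp)
  rw [List.nil_append] at hall
  rw [hall]
  rw [dedup_eq _ [] none (by simp) (sorted2_pairwise_fst _) rfl]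
  simp
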